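-- pv_equiv track=rewrite | github.com/ijinyu1113/Learned-Remasking-Policy-for-dLLM | eval/pipeline.py | resolve_checkpoint_refs
-- ===== SOURCE A (Python) =====
-- def resolve_checkpoint_refs(ckpt_names: list[str], checkpoints: list[str]) -> list[str]:
--     if "first" not in checkpoints and "last" not in checkpoints:
--         return checkpoints
--
--     ckpt_nums = []
--     for name in ckpt_names:
--         if name.startswith("checkpoint-"):
--             num = name.replace("checkpoint-", "")
--             if num.isdigit():
--                 ckpt_nums.append(int(num))
--
--     assert ckpt_nums, "No checkpoints found"
--     ckpt_nums.sort()
--     first, last = str(ckpt_nums[0]), str(ckpt_nums[-1])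
--
--     resolved = []
--     for ckpt in checkpoints:
--         if ckpt == "first":
--             resolved.append(first)
--         elif ckpt == "last":
--             resolved.append(last)
--         else:
--             resolved.append(ckpt)
--
--     return list(dict.fromkeys(resolved))
-- ===== SOURCE B (Python) =====
-- def resolve_checkpoint_refs(ckpt_names: list[str], checkpoints: list[str]) -> list[str]:
--     if "first" not in checkpoints and "last" not in checkpoints:
--         return checkpoints
--
--     lo = hi = None
--     for name in ckpt_names:
--         if name.startswith("checkpoint-"):
--             num = name.replace("checkpoint-", "")
--             if num.isdigit():
--                 n = int(num)
--                 if lo is None: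
--                     lo = hi = n
--                 else:
--                     if n < lo:
--                         lo = n
--                     if hi < n:
--                         hi = n
--
--     assert lo is not None, "No checkpoints found"
--     first, last = str(lo), str(hi)
--
--     out = []
--     seen = set()
--     for ckpt in checkpoints:
--         r = first if ckpt == "first" else last if ckpt == "last" else ckpt
--         if r not in seen:
--             seen.add(r)
--             out.append(r)
--     return out
-- ===== Notes on version B (the rewrite author's own statement) =====
-- stated objective: alternative
-- what changed: B fuses parsing with a running min/max (no intermediate list, no sort, no indexing) and fuses the resolution loop with a seen-set dedup, replacing A's collect-sort-index-then-dict.fromkeys pipeline.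
import Mathlib
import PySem

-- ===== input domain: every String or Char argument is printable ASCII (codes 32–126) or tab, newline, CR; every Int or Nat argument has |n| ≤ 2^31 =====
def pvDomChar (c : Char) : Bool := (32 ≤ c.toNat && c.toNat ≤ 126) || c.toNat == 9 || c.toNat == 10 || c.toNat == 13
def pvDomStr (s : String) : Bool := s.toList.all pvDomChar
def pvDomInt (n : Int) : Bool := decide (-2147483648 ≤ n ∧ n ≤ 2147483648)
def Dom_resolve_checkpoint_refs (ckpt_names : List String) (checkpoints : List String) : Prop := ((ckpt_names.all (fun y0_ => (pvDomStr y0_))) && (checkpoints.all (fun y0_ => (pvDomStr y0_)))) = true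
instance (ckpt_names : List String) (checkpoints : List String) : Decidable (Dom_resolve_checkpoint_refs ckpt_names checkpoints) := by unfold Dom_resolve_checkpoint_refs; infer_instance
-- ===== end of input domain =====

-- B replaces A's collect-then-sort-then-index step by a fused single pass keeping a running
-- min/max, and the resolve-then-dict.fromkeys dedup by a seen-set maintained while resolving
-- (alternative algorithm, same results; equivalence of return values proved below).

-- ===== PORT A =====
def resolve_checkpoint_refs (ckpt_names : List String) (checkpoints : List String) : List String :=
  if !(checkpoints.contains "first") && !(checkpoints.contains "last") then checkpoints
  else
    let ckpt_nums : List Int := ckpt_names.foldl (fun acc name =>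
      if PySem.Str.startswith name "checkpoint-" then
        let num := PySem.Str.replace name "checkpoint-" ""
        if PySem.Str.strIsdigit num then acc ++ [(PySem.Int.ofStr? num).getD 0] else acc
      else acc) []
    -- Python's 'assert ckpt_nums' raises on [] — those inputs are excluded by Pre_
    let sorted := PySem.List.sorted ckpt_nums (fun x => x) false
    let first := PySem.Int.toStr ((PySem.List.pyGet? sorted 0).getD 0)
    let last := PySem.Int.toStr ((PySem.List.pyGet? sorted (-1)).getD 0)
    let resolved := checkpoints.foldl (fun acc ckpt =>
      if ckpt == "first" then acc ++ [first]
      else if ckpt == "last" then acc ++ [last]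
      else acc ++ [ckpt]) []
    PySem.List.dedup resolved

-- ===== PORT B =====
def resolve_checkpoint_refs_alt (ckpt_names : List String) (checkpoints : List String) : List String :=
  if !(checkpoints.contains "first") && !(checkpoints.contains "last") then checkpoints
  else
    let bounds : Option (Int × Int) := ckpt_names.foldl (fun acc name =>
      if PySem.Str.startswith name "checkpoint-" then
        let num := PySem.Str.replace name "checkpoint-" ""
        if PySem.Str.strIsdigit num then
          let n := (PySem.Int.ofStr? num).getD 0
          match acc with
          | none => some (n, n)
          | some (lo, hi) => some (if n < lo then n else lo, if hi < n then n else hi)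
        else acc
      else acc) none
    match bounds with
    | none => []   -- Python's 'assert lo is not None' raises here — excluded by Pre_
    | some (lo, hi) =>
      let first := PySem.Int.toStr lo
      let last := PySem.Int.toStr hi
      (checkpoints.foldl (fun (p : List String × PySem.Set String) ckpt =>
        let r := if ckpt == "first" then first else if ckpt == "last" then last else ckpt
        if PySem.Set.contains p.2 r then p else (p.1 ++ [r], PySem.Set.add p.2 r))
        ([], PySem.Set.empty)).1

-- ===== PRECONDITION & SPEC =====
-- Pre_ excludes exactly the inputs on which A's 'assert ckpt_nums' raises AssertionError
-- (a ref "first"/"last" is present but no name parses as "checkpoint-<digits>"); B raises there too.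
def Pre_resolve_checkpoint_refs (ckpt_names : List String) (checkpoints : List String) : Prop :=
  ("first" ∈ checkpoints ∨ "last" ∈ checkpoints) →
    ∃ name ∈ ckpt_names, PySem.Str.startswith name "checkpoint-" = true ∧
      PySem.Str.strIsdigit (PySem.Str.replace name "checkpoint-" "") = true
instance (ckpt_names : List String) (checkpoints : List String) : Decidable (Pre_resolve_checkpoint_refs ckpt_names checkpoints) := by unfold Pre_resolve_checkpoint_refs; infer_instance

def pvWitness_resolve_checkpoint_refs : List String × List String :=
  (["checkpoint-5", "checkpoint-12"], ["first", "last", "extra"])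

def Spec_resolve_checkpoint_refs (ckpt_names : List String) (checkpoints : List String) (out : List String) : Prop := out = resolve_checkpoint_refs_alt ckpt_names checkpoints
instance (ckpt_names : List String) (checkpoints : List String) (out : List String) : Decidable (Spec_resolve_checkpoint_refs ckpt_names checkpoints out) := by unfold Spec_resolve_checkpoint_refs; infer_instance

-- ===== CLAIM (what is proved, stated in full; the proofs are below) =====
def Claim_equal_resolve_checkpoint_refs : Prop := ∀ (ckpt_names : List String) (checkpoints : List String), Dom_resolve_checkpoint_refs ckpt_names checkpoints → Pre_resolve_checkpoint_refs ckpt_names checkpoints → Spec_resolve_checkpoint_refs ckpt_names checkpoints (resolve_checkpoint_refs ckpt_names checkpoints)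

-- ===== LEMMAS AND PROOFS =====

theorem foldl_minmax_some (t : List Int) (lo hi : Int) :
    t.foldl (fun (acc : Option (Int × Int)) n =>
      match acc with
      | none => some (n, n)
      | some (lo, hi) => some (if n < lo then n else lo, if hi < n then n else hi)) (some (lo, hi))
    = some (t.foldl min lo, t.foldl max hi) := by
  induction t generalizing lo hi with
  | nil => rfl
  | cons x t ih =>
    simp only [List.foldl_cons]
    rw [ih]
    have h1 : (if x < lo then x else lo) = min lo x := by
      rw [min_def]; split_ifs <;> omega
    have h2 : (if hi < x then x else hi) = max hi x := by
      rw [max_def]; split_ifs <;> omega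
    rw [h1, h2]

theorem foldl_minmax_cons (h : Int) (t : List Int) :
    (h :: t).foldl (fun (acc : Option (Int × Int)) n =>
      match acc with
      | none => some (n, n)
      | some (lo, hi) => some (if n < lo then n else lo, if hi < n then n else hi)) none
    = some (t.foldl min h, t.foldl max h) := by
  simp only [List.foldl_cons]
  exact foldl_minmax_some t h h

-- head of sorted(L) is the running min, last of sorted(L) is the running max
theorem sorted_head_min (h : Int) (t : List Int) :
    (PySem.List.pyGet? (PySem.List.sorted (h :: t) (fun x => x) false) 0).getD 0
      = t.foldl min h := by
  have hperm := PySem.List.sorted_perm (h :: t) (fun x => x) false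
  have hne : PySem.List.sorted (h :: t) (fun x => x) false ≠ [] := by
    intro hnil; rw [PySem.List.sorted_eq_nil_iff] at hnil; exact (List.cons_ne_nil _ _) hnil
  obtain ⟨m, s, hs⟩ := List.exists_cons_of_ne_nil hne
  rw [hs]
  have hmem : m ∈ h :: t := hperm.mem_iff.mp (hs ▸ List.mem_cons_self)
  have hle : ∀ y ∈ (h :: t), m ≤ y := PySem.List.key_head_sorted_le (h :: t) (fun x => x) hs
  have hmin := PySem.List.foldl_min_le t h
  have hm1 : t.foldl min h ≤ m := by
    rcases List.mem_cons.mp hmem with rfl | hm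
    · exact hmin.1
    · exact hmin.2 m hm
  have hm2 : m ≤ t.foldl min h := by
    rcases PySem.List.foldl_min_mem t h with he | he
    · rw [he]; exact hle h List.mem_cons_self
    · exact hle _ (List.mem_cons_of_mem _ he)
  have : m = t.foldl min h := le_antisymm hm2 hm1
  simp [PySem.List.pyGet?, PySem.List.pyIdx?, this]

theorem sorted_last_max (h : Int) (t : List Int) :
    (PySem.List.pyGet? (PySem.List.sorted (h :: t) (fun x => x) false) (-1)).getD 0
      = t.foldl max h := by
  have hperm := PySem.List.sorted_perm (h :: t) (fun x => x) false
  set s := PySem.List.sorted (h :: t) (fun x => x) false with hsdef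
  have hne : s ≠ [] := by
    intro hnil; rw [hsdef, PySem.List.sorted_eq_nil_iff] at hnil; exact (List.cons_ne_nil _ _) hnil
  have hlen : 0 < s.length := List.length_pos_iff.mpr hne
  have hget : PySem.List.pyGet? s (-1) = some (s.getLast hne) := by
    simp only [PySem.List.pyGet?, PySem.List.pyIdx?]
    rw [if_neg (by omega : ¬ (0 : Int) ≤ -1), if_pos (by omega : -(s.length : Int) ≤ -1)]
    have hidx : s.length - (-(-1 : Int)).toNat = s.length - 1 := by norm_num
    rw [hidx, List.getLast_eq_getElem]
    exact List.getElem?_eq_getElem (by omega)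
  rw [hget]
  simp only [Option.getD_some]
  have hmem : s.getLast hne ∈ h :: t :=
    hperm.mem_iff.mp (List.getLast_mem hne)
  have hge : ∀ y ∈ (h :: t), y ≤ s.getLast hne := by
    intro y hy
    have hy' : y ∈ s := hperm.mem_iff.mpr hy
    obtain ⟨p, hp, hyp⟩ := List.getElem_of_mem hy'
    have hmono := PySem.List.key_sorted_getElem_mono (xs := h :: t) (key := fun x => x)
      (p := p) (q := s.length - 1) (by omega)
      (by rw [← hsdef]; omega)
    rw [List.getLast_eq_getElem, ← hyp]
    exact hmono
  have hmax := PySem.List.le_foldl_max t h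
  have hm1 : s.getLast hne ≤ t.foldl max h := by
    rcases List.mem_cons.mp hmem with he | hm
    · rw [he]; exact hmax.1
    · exact hmax.2 _ hm
  have hm2 : t.foldl max h ≤ s.getLast hne := by
    rcases PySem.List.foldl_max_mem t h with he | he
    · rw [he]; exact hge h List.mem_cons_self
    · exact hge _ (List.mem_cons_of_mem _ he)
  exact le_antisymm hm1 hm2

-- B's resolve-and-dedup loop computes dedup of the mapped list
theorem foldl_seen_eq_ofList (r : String → String) (cs : List String) (s : PySem.Set String) :
    (cs.foldl (fun (p : List String × PySem.Set String) ckpt =>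
        if PySem.Set.contains p.2 (r ckpt) then p
        else (p.1 ++ [r ckpt], PySem.Set.add p.2 (r ckpt))) (s, s)).1
      = cs.foldl (fun acc ckpt => PySem.Set.add acc (r ckpt)) s := by
  induction cs generalizing s with
  | nil => rfl
  | cons c cs ih =>
    simp only [List.foldl_cons]
    by_cases hc : PySem.Set.contains s (r c) = true
    · rw [if_pos hc]
      have : PySem.Set.add s (r c) = s := by
        simp only [PySem.Set.add]; rw [if_pos (by simpa using hc)]
      rw [this]; exact ih s
    · rw [if_neg hc]
      have : PySem.Set.add s (r c) = s ++ [r c] := by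
        simp only [PySem.Set.add]; rw [if_neg (by simpa using hc)]
      rw [this]; exact ih (s ++ [r c])

-- ===== VERDICT (by name: the statement is the Claim_ definition above) =====
theorem resolve_checkpoint_refs_spec : Claim_equal_resolve_checkpoint_refs := by
  intro ckpt_names checkpoints _ hpre
  unfold Spec_resolve_checkpoint_refs resolve_checkpoint_refs resolve_checkpoint_refs_alt
  by_cases hg : (!(checkpoints.contains "first") && !(checkpoints.contains "last")) = true
  · rw [if_pos hg, if_pos hg]
  · rw [if_neg hg, if_neg hg]
    simp only []
    have hguard : "first" ∈ checkpoints ∨ "last" ∈ checkpoints := by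
      simp only [Bool.and_eq_true, Bool.not_eq_true'] at hg
      rcases (not_and_or.mp hg) with h | h
      · left; simpa [List.contains_eq_mem] using h
      · right; simpa [List.contains_eq_mem] using h
    obtain ⟨w, hw, hw1, hw2⟩ := hpre hguard
    -- A's parsed list as a filter-map
    have hA : ckpt_names.foldl (fun acc name =>
        if PySem.Str.startswith name "checkpoint-" then
          if PySem.Str.strIsdigit (PySem.Str.replace name "checkpoint-" "") then
            acc ++ [(PySem.Int.ofStr? (PySem.Str.replace name "checkpoint-" "")).getD 0]
          else acc
        else acc) ([] : List Int)
        = ((ckpt_names.filter (fun name => PySem.Str.startswith name "checkpoint-" &&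
             PySem.Str.strIsdigit (PySem.Str.replace name "checkpoint-" ""))).map
             (fun name => (PySem.Int.ofStr? (PySem.Str.replace name "checkpoint-" "")).getD 0)) := by
      rw [PySem.List.foldl_congr_mem (g := fun acc name =>
        if (PySem.Str.startswith name "checkpoint-" &&
            PySem.Str.strIsdigit (PySem.Str.replace name "checkpoint-" "")) = true
        then acc ++ [(PySem.Int.ofStr? (PySem.Str.replace name "checkpoint-" "")).getD 0]
        else acc)]
      · rw [PySem.List.foldl_append_if]
        rfl
      · intro acc x _
        cases h1 : PySem.Str.startswith x "checkpoint-" <;>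
          cases h2 : PySem.Str.strIsdigit (PySem.Str.replace x "checkpoint-" "") <;> simp
    have hBfold : ckpt_names.foldl (fun (acc : Option (Int × Int)) name =>
        if PySem.Str.startswith name "checkpoint-" then
          if PySem.Str.strIsdigit (PySem.Str.replace name "checkpoint-" "") then
            (fun (acc : Option (Int × Int)) (n : Int) =>
              match acc with
              | none => some (n, n)
              | some (lo, hi) => some (if n < lo then n else lo, if hi < n then n else hi)) acc
              ((PySem.Int.ofStr? (PySem.Str.replace name "checkpoint-" "")).getD 0)
          else acc
        else acc) none
        = ((ckpt_names.filter (fun name => PySem.Str.startswith name "checkpoint-" &&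
             PySem.Str.strIsdigit (PySem.Str.replace name "checkpoint-" ""))).map
             (fun name => (PySem.Int.ofStr? (PySem.Str.replace name "checkpoint-" "")).getD 0)).foldl
            (fun (acc : Option (Int × Int)) n =>
              match acc with
              | none => some (n, n)
              | some (lo, hi) => some (if n < lo then n else lo, if hi < n then n else hi)) none := by
      rw [PySem.List.foldl_congr_mem (g := fun (acc : Option (Int × Int)) name =>
        if (PySem.Str.startswith name "checkpoint-" &&
            PySem.Str.strIsdigit (PySem.Str.replace name "checkpoint-" "")) = true
        then (fun (acc : Option (Int × Int)) (n : Int) =>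
              match acc with
              | none => some (n, n)
              | some (lo, hi) => some (if n < lo then n else lo, if hi < n then n else hi)) acc
              ((PySem.Int.ofStr? (PySem.Str.replace name "checkpoint-" "")).getD 0)
        else acc)]
      · rw [PySem.List.foldl_if_eq_foldl_filter, List.foldl_map]
      · intro acc x _
        cases h1 : PySem.Str.startswith x "checkpoint-" <;>
          cases h2 : PySem.Str.strIsdigit (PySem.Str.replace x "checkpoint-" "") <;> simp
    have hLne : ((ckpt_names.filter (fun name => PySem.Str.startswith name "checkpoint-" &&
             PySem.Str.strIsdigit (PySem.Str.replace name "checkpoint-" ""))).map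
             (fun name => (PySem.Int.ofStr? (PySem.Str.replace name "checkpoint-" "")).getD 0)) ≠ [] := by
      intro hnil
      rw [List.map_eq_nil_iff, List.filter_eq_nil_iff] at hnil
      exact hnil w hw (by simp only [hw1, hw2, Bool.and_self])
    obtain ⟨h, t, hL⟩ := List.exists_cons_of_ne_nil hLne
    rw [hL] at hA hBfold
    rw [hA, hBfold, foldl_minmax_cons]
    simp only []
    rw [sorted_head_min, sorted_last_max]
    rw [show (([] : List String), (PySem.Set.empty : PySem.Set String))
          = ((PySem.Set.empty : PySem.Set String), (PySem.Set.empty : PySem.Set String)) from rfl]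
    rw [foldl_seen_eq_ofList (r := fun ckpt =>
      if ckpt == "first" then PySem.Int.toStr (t.foldl min h)
      else if ckpt == "last" then PySem.Int.toStr (t.foldl max h) else ckpt)]
    rw [PySem.List.foldl_congr_mem (g := fun acc ckpt => acc ++
      [if ckpt == "first" then PySem.Int.toStr (t.foldl min h)
       else if ckpt == "last" then PySem.Int.toStr (t.foldl max h) else ckpt])]
    · rw [PySem.List.foldl_append_singleton_eq_map, List.nil_append,
        PySem.List.dedup_eq_ofList, PySem.Set.ofList_eq_foldl, List.foldl_map]
      rfl
    · intro acc x _
      by_cases h1 : (x == "first") = true <;> by_cases h2 : (x == "last") = true <;>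
        simp [h1, h2]
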